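-- pv_equiv track=rewrite | github.com/sunrabbit123/TIL | Language/Python/Algorithem/String/03.reorderLog/reorederLog.py | reorederLog1
-- ===== SOURCE A (Python) =====
-- def reorederLog1(s) -> None:
--     letters, digits = [], []
--     for log in s:
--         if log.split()[1].isdigit():
--             digits.append(log)
--         else:
--             letters.append(log)
--     letters.sort(key=lambda x: (x.split()[1:], x.split()[0]))
--     return letters + digits
-- ===== SOURCE B (Python) =====
-- def reorederLog1(s) -> None:
--     def key(log):
--         words = log.split()
--         if words[1].isdigit():
--             return (1, [], "")
--         return (0, words[1:], words[0])
--     return sorted(s, key=key)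
-- ===== Notes on version B (the rewrite author's own statement) =====
-- stated objective: idiomatic
-- what changed: Replaces the partition loop + separate in-place sort + concatenation by a single stable sort of the whole list under one key: letter-logs get (0, content-words, identifier), digit-logs all get the identical maximal key (1, [], ""), so stability keeps digit-logs in input order after all letter-logs.
import Mathlib
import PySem

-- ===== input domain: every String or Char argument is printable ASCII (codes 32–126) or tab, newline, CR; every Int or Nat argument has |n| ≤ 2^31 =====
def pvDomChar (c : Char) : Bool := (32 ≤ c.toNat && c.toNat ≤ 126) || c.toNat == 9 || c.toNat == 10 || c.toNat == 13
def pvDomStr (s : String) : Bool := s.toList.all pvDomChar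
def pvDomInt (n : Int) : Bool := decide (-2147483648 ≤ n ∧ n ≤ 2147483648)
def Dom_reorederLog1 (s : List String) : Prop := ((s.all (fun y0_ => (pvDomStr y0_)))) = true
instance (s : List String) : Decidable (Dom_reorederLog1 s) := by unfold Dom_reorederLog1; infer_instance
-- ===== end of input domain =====

-- B replaces A's partition loop + separate stable sort + concatenation by ONE stable sort of the
-- whole list under a single key (digit-logs share an identical maximal key); objective: idiomatic.

-- ===== PORT A =====
-- shared pieces of both Pythons: log.split()[1].isdigit(), x.split()[1:], x.split()[0]
def pvIsDigitLog (log : String) : Bool :=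
  PySem.Str.strIsdigit (PySem.List.pyGetD (PySem.Str.split₀ log) 1 "")
def pvWords1 (x : String) : List String := PySem.List.slice (PySem.Str.split₀ x) (some 1) none
def pvWord0 (x : String) : String := PySem.List.pyGetD (PySem.Str.split₀ x) 0 ""

def reorederLog1 (s : List String) : List String :=
  let ld := s.foldl
    (fun (acc : List String × List String) log =>
      if pvIsDigitLog log then (acc.1, acc.2 ++ [log]) else (acc.1 ++ [log], acc.2))
    ([], [])
  PySem.List.sorted2 ld.1 pvWords1 pvWord0 ++ ld.2

-- ===== PORT B =====
-- key(log) of Source B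
def pvKey (log : String) : Int × List String × String :=
  if pvIsDigitLog log then (1, [], "") else (0, pvWords1 log, pvWord0 log)

-- Python's lexicographic '<' on the 3-tuples returned by key (exact: first unequal component decides)
def pvTupleLt (a b : Int × List String × String) : Bool :=
  decide (a.1 < b.1) ||
    (decide (a.1 = b.1) && (decide (a.2.1 < b.2.1) ||
      (decide (a.2.1 = b.2.1) && decide (a.2.2 < b.2.2))))

def pvBefore (a b : String) : Bool := pvTupleLt (pvKey a) (pvKey b)

-- sorted(s, key=key): Python's stable sort, as PySem models it (stable insertion via insertBy)
def reorederLog1_alt (s : List String) : List String :=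
  s.foldl (fun acc x => PySem.List.insertBy pvBefore x acc) []

-- ===== PRECONDITION & SPEC =====
-- Pre_ excludes exactly the inputs on which the Python A raises IndexError:
-- some log with fewer than two whitespace-separated words (log.split()[1] fails).
-- pvTwoWords log = true ↔ log has at least two whitespace-separated words (2 ≤ (split₀ log).length)
def pvTwoWords (s : String) : Bool :=
  let r1 := s.toList.dropWhile PySem.Chars.isspace
  let r2 := (r1.dropWhile (fun c => !PySem.Chars.isspace c)).dropWhile PySem.Chars.isspace
  !r1.isEmpty && !r2.isEmpty
def Pre_reorederLog1 (s : List String) : Prop :=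
  ∀ log ∈ s, pvTwoWords log = true
instance (s : List String) : Decidable (Pre_reorederLog1 s) := by unfold Pre_reorederLog1; infer_instance

def pvWitness_reorederLog1 : List String :=
  ["dig1 8 1 5 1", "let1 art can", "dig2 3 6", "let2 own kit dig", "let3 art zero"]

def Spec_reorederLog1 (s : List String) (out : List String) : Prop := out = reorederLog1_alt s
instance (s : List String) (out : List String) : Decidable (Spec_reorederLog1 s out) := by unfold Spec_reorederLog1; infer_instance

-- ===== CLAIM (what is proved, stated in full; the proofs are below) =====
def Claim_equal_reorederLog1 : Prop := ∀ (s : List String), Dom_reorederLog1 s → Pre_reorederLog1 s → Spec_reorederLog1 s (reorederLog1 s)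

-- ===== LEMMAS AND PROOFS =====

-- the comparison A's sort uses (sorted2's 'before' for keys pvWords1, pvWord0)
def pvLtA (a b : String) : Bool :=
  decide (pvWords1 a < pvWords1 b) ||
    (!decide (pvWords1 b < pvWords1 a) && decide (pvWord0 a < pvWord0 b))

theorem pv_insertBy_congr {α : Type} (b1 b2 : α → α → Bool) (x : α) (ys : List α)
    (h : ∀ y ∈ ys, b1 x y = b2 x y) :
    PySem.List.insertBy b1 x ys = PySem.List.insertBy b2 x ys := by
  induction ys with
  | nil => rfl
  | cons y ys ih =>
    have hy := h y (by simp)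
    simp only [PySem.List.insertBy, hy]
    by_cases hc : b2 x y = true
    · simp [hc]
    · simp only [Bool.not_eq_true] at hc
      simp [hc, ih (fun z hz => h z (by simp [hz]))]

theorem pv_insertBy_append {α : Type} (before : α → α → Bool) (x : α) (L D : List α)
    (hD : ∀ d ∈ D, before x d = true) :
    PySem.List.insertBy before x (L ++ D) = PySem.List.insertBy before x L ++ D := by
  induction L with
  | nil =>
    cases D with
    | nil => rfl
    | cons d D' => simp [PySem.List.insertBy, hD d (by simp)]
  | cons y L' ih =>
    by_cases hc : before x y = true
    · simp [PySem.List.insertBy, hc]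
    · simp only [Bool.not_eq_true] at hc
      simp [PySem.List.insertBy, hc, ih]

theorem pvKey_digit (x : String) (h : pvIsDigitLog x = true) : pvKey x = (1, [], "") := by
  simp [pvKey, h]

theorem pvKey_letter (x : String) (h : pvIsDigitLog x = false) :
    pvKey x = (0, pvWords1 x, pvWord0 x) := by
  simp [pvKey, h]

theorem pvBefore_digit_false (x y : String) (hx : pvIsDigitLog x = true) :
    pvBefore x y = false := by
  by_cases hy : pvIsDigitLog y = true
  · simp [pvBefore, pvKey_digit x hx, pvKey_digit y hy, pvTupleLt]
  · simp only [Bool.not_eq_true] at hy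
    simp [pvBefore, pvKey_digit x hx, pvKey_letter y hy, pvTupleLt]

theorem pvBefore_letter_digit (x y : String) (hx : pvIsDigitLog x = false)
    (hy : pvIsDigitLog y = true) : pvBefore x y = true := by
  simp [pvBefore, pvKey_letter x hx, pvKey_digit y hy, pvTupleLt]

theorem pvBefore_letters (x y : String) (hx : pvIsDigitLog x = false)
    (hy : pvIsDigitLog y = false) : pvBefore x y = pvLtA x y := by
  simp only [pvBefore, pvKey_letter x hx, pvKey_letter y hy, pvTupleLt, pvLtA]
  rcases lt_trichotomy (pvWords1 x) (pvWords1 y) with h | h | h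
  · simp [h]
  · simp [h]
  · simp [lt_asymm h, ne_of_gt h, h]

theorem pv_B_split (s : List String) : ∀ (L D : List String),
    (∀ x ∈ L, pvIsDigitLog x = false) → (∀ x ∈ D, pvIsDigitLog x = true) →
    s.foldl (fun acc x => PySem.List.insertBy pvBefore x acc) (L ++ D)
      = (s.filter (fun x => !pvIsDigitLog x)).foldl
          (fun acc x => PySem.List.insertBy pvBefore x acc) L
        ++ D ++ s.filter pvIsDigitLog := by
  induction s with
  | nil => intro L D _ _; simp
  | cons x s ih =>
    intro L D hL hD
    by_cases hx : pvIsDigitLog x = true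
    · have hstep : PySem.List.insertBy pvBefore x (L ++ D) = L ++ (D ++ [x]) := by
        rw [PySem.List.insertBy_of_forall_not_before _ _ _
          (fun y _ => pvBefore_digit_false x y hx), List.append_assoc]
      simp only [List.foldl_cons, hstep]
      rw [ih L (D ++ [x]) hL (by intro z hz; rcases List.mem_append.mp hz with h | h
                                 · exact hD z h
                                 · simp at h; simpa [h] using hx)]
      simp [hx]
    · simp only [Bool.not_eq_true] at hx
      have hstep : PySem.List.insertBy pvBefore x (L ++ D)
          = PySem.List.insertBy pvBefore x L ++ D :=
        pv_insertBy_append pvBefore x L D (fun d hd => pvBefore_letter_digit x d hx (hD d hd))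
      simp only [List.foldl_cons, hstep]
      rw [ih (PySem.List.insertBy pvBefore x L) D
            (by intro z hz
                rcases (PySem.List.mem_insertBy pvBefore x z L).mp hz with h | h
                · simpa [h] using hx
                · exact hL z h) hD]
      simp [hx]

theorem pv_partition (s : List String) : ∀ (l d : List String),
    s.foldl (fun (acc : List String × List String) log =>
        if pvIsDigitLog log then (acc.1, acc.2 ++ [log]) else (acc.1 ++ [log], acc.2)) (l, d)
      = (l ++ s.filter (fun x => !pvIsDigitLog x), d ++ s.filter pvIsDigitLog) := by
  induction s with
  | nil => intro l d; simp
  | cons x s ih =>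
    intro l d
    by_cases hx : pvIsDigitLog x = true
    · simp [hx, ih]
    · simp only [Bool.not_eq_true] at hx
      simp [hx, ih]

theorem pv_letters_sort_agree (l : List String) : ∀ (acc : List String),
    (∀ x ∈ l, pvIsDigitLog x = false) → (∀ x ∈ acc, pvIsDigitLog x = false) →
    l.foldl (fun a x => PySem.List.insertBy pvLtA x a) acc
      = l.foldl (fun a x => PySem.List.insertBy pvBefore x a) acc := by
  induction l with
  | nil => intro acc _ _; rfl
  | cons x l ih =>
    intro acc hl hacc
    have hx : pvIsDigitLog x = false := hl x (by simp)
    have hcongr : PySem.List.insertBy pvLtA x acc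
        = PySem.List.insertBy pvBefore x acc :=
      pv_insertBy_congr pvLtA pvBefore x acc
        (fun y hy => (pvBefore_letters x y hx (hacc y hy)).symm)
    simp only [List.foldl_cons, hcongr]
    exact ih _ (fun z hz => hl z (by simp [hz]))
      (fun z hz => by
        rcases (PySem.List.mem_insertBy pvBefore x z acc).mp hz with h | h
        · simpa [h] using hx
        · exact hacc z h)

theorem pv_sorted2_unfold (l : List String) :
    PySem.List.sorted2 l pvWords1 pvWord0
      = l.foldl (fun a x => PySem.List.insertBy pvLtA x a) [] := rfl

-- ===== VERDICT (by name: the statement is the Claim_ definition above) =====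
theorem reorederLog1_spec : Claim_equal_reorederLog1 := by
  intro s _ _
  unfold Spec_reorederLog1 reorederLog1 reorederLog1_alt
  rw [pv_partition s [] []]
  simp only [List.nil_append]
  rw [pv_sorted2_unfold,
    pv_letters_sort_agree _ [] (by intro z hz; simpa using (List.mem_filter.mp hz).2)
      (by intro z hz; simp at hz)]
  have hB := pv_B_split s [] [] (by intro z hz; simp at hz) (by intro z hz; simp at hz)
  simp only [List.append_nil] at hB
  exact hB.symm
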